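-- pv_equiv track=rewrite | github.com/jhw/strudelbreaks | app/export/octatrack/ot_basic/render.py | expand_cell
-- ===== SOURCE A (Python) =====
-- def expand_cell(break_names, pattern_idxs, events_per_cycle):
--     """Expand a captured (break, pattern) cell to events_per_cycle (name, slice_idx|None) events.
--
--     Break names come from Strudel's polymetric-stretch curly form
--     `{a b c d}%N` — see STRUDEL.md ("Polymetric stretch") for the mapping.
--     Pattern slice indices are positional `[i j k ...]`, one per event.
--     Output is one Strudel cycle; OT pattern looping handles repeats.
--     """
--     events = []
--     n_names = len(break_names)
--     for pos in range(events_per_cycle):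
--         name = break_names[pos * n_names // events_per_cycle]
--         slice_idx = pattern_idxs[pos] if pos < len(pattern_idxs) else None
--         events.append((name, slice_idx))
--     return events
-- ===== SOURCE B (Python) =====
-- def expand_cell(break_names, pattern_idxs, events_per_cycle):
--     """Names-outer traversal: for each name index k, emit its whole run of
--     output positions, with integer-ceil run boundaries."""
--     n_names = len(break_names)
--     events = []
--     for k in range(n_names):
--         start = (k * events_per_cycle + n_names - 1) // n_names
--         end = ((k + 1) * events_per_cycle + n_names - 1) // n_names
--         for pos in range(start, end):
--             events.append((break_names[k],
--                            pattern_idxs[pos] if pos < len(pattern_idxs) else None))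
--     return events
-- ===== Notes on version B (the rewrite author's own statement) =====
-- stated objective: alternative
-- what changed: Replaces A's flat position-by-position scan, which re-derives the owning break name at every position via pos*n_names//events_per_cycle, with a names-outer/positions-inner traversal that computes each name's run of output positions once from integer-ceil partition boundaries.
import Mathlib
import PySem

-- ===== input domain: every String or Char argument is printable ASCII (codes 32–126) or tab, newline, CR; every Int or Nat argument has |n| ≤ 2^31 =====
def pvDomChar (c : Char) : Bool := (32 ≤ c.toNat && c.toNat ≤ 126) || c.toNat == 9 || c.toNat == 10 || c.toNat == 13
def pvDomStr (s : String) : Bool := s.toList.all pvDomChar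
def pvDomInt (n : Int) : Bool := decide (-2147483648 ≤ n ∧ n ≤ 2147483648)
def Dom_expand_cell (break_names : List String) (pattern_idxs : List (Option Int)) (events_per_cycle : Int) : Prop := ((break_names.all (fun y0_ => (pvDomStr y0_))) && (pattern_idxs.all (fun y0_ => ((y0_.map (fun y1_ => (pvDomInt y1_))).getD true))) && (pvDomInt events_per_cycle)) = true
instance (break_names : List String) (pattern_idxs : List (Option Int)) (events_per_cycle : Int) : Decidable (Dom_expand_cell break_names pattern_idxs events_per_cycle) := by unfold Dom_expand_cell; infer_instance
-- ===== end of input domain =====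

-- B replaces A's flat position-by-position scan (which re-derives the owning name at every
-- step) by a names-outer / positions-inner traversal over integer-ceil run boundaries;
-- objective: alternative decomposition (same asymptotic cost).

-- ===== PORT A =====
def expand_cell (break_names : List String) (pattern_idxs : List (Option Int)) (events_per_cycle : Int) : List (String × Option Int) :=
  let n_names : Int := break_names.length
  (PySem.List.pyRange 0 events_per_cycle 1).foldl
    (fun events pos =>
      -- break_names[...]: pyGet? = none is Python's IndexError; Pre_ excludes those inputs,
      -- so the .getD "" default is never taken on admitted inputs
      let name := (PySem.List.pyGet? break_names (PySem.Int.floordiv (pos * n_names) events_per_cycle)).getD ""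
      let slice_idx := if pos < (pattern_idxs.length : Int) then (PySem.List.pyGet? pattern_idxs pos).getD none else none
      events ++ [(name, slice_idx)]) []

-- ===== PORT B =====
def expand_cell_alt (break_names : List String) (pattern_idxs : List (Option Int)) (events_per_cycle : Int) : List (String × Option Int) :=
  let n_names : Int := break_names.length
  (PySem.List.pyRange 0 n_names 1).foldl
    (fun events k =>
      let start := PySem.Int.floordiv (k * events_per_cycle + n_names - 1) n_names
      let stop := PySem.Int.floordiv ((k + 1) * events_per_cycle + n_names - 1) n_names
      (PySem.List.pyRange start stop 1).foldl
        (fun evs pos =>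
          -- break_names[k] with 0 ≤ k < len: always in range
          evs ++ [((PySem.List.pyGet? break_names k).getD "",
                   if pos < (pattern_idxs.length : Int) then (PySem.List.pyGet? pattern_idxs pos).getD none else none)]) events) []

-- ===== PRECONDITION & SPEC =====
-- Pre_ excludes exactly the inputs where A raises IndexError: empty break_names with a
-- positive events_per_cycle (break_names[0] raises on the first iteration).
def Pre_expand_cell (break_names : List String) (pattern_idxs : List (Option Int)) (events_per_cycle : Int) : Prop :=
  break_names ≠ [] ∨ events_per_cycle ≤ 0
instance (break_names : List String) (pattern_idxs : List (Option Int)) (events_per_cycle : Int) : Decidable (Pre_expand_cell break_names pattern_idxs events_per_cycle) := by unfold Pre_expand_cell; infer_instance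
def pvWitness_expand_cell : List String × List (Option Int) × Int := (["a", "b"], [some 1, none, some 0], 4)


def Spec_expand_cell (break_names : List String) (pattern_idxs : List (Option Int)) (events_per_cycle : Int) (out : List (String × Option Int)) : Prop := out = expand_cell_alt break_names pattern_idxs events_per_cycle
instance (break_names : List String) (pattern_idxs : List (Option Int)) (events_per_cycle : Int) (out : List (String × Option Int)) : Decidable (Spec_expand_cell break_names pattern_idxs events_per_cycle out) := by unfold Spec_expand_cell; infer_instance

-- ===== CLAIM (what is proved, stated in full; the proofs are below) =====
def Claim_equal_expand_cell : Prop := ∀ (break_names : List String) (pattern_idxs : List (Option Int)) (events_per_cycle : Int), Dom_expand_cell break_names pattern_idxs events_per_cycle → Pre_expand_cell break_names pattern_idxs events_per_cycle → Spec_expand_cell break_names pattern_idxs events_per_cycle (expand_cell break_names pattern_idxs events_per_cycle)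

-- ===== LEMMAS AND PROOFS =====

-- the per-event value A computes at output position pos
def pvF (break_names : List String) (pattern_idxs : List (Option Int)) (e : Int) (pos : Int) : String × Option Int :=
  ((PySem.List.pyGet? break_names (PySem.Int.floordiv (pos * (break_names.length : Int)) e)).getD "",
   if pos < (pattern_idxs.length : Int) then (PySem.List.pyGet? pattern_idxs pos).getD none else none)

-- B's run boundary for name index k
def pvBd (break_names : List String) (e k : Int) : Int :=
  PySem.Int.floordiv (k * e + (break_names.length : Int) - 1) (break_names.length : Int)

lemma pvA_eq_map (bn : List String) (pi : List (Option Int)) (e : Int) :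
    expand_cell bn pi e = (PySem.List.pyRange 0 e 1).map (pvF bn pi e) := by
  simp only [expand_cell, PySem.List.foldl_append_singleton_eq_map, List.nil_append]
  apply List.map_congr_left
  intro pos _
  rfl

lemma pvB_eq_flatMap (bn : List String) (pi : List (Option Int)) (e : Int) :
    expand_cell_alt bn pi e =
      (PySem.List.pyRange 0 (bn.length : Int) 1).flatMap (fun k =>
        (PySem.List.pyRange (pvBd bn e k) (pvBd bn e (k + 1)) 1).map (fun pos =>
          ((PySem.List.pyGet? bn k).getD "",
           if pos < (pi.length : Int) then (PySem.List.pyGet? pi pos).getD none else none))) := by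
  simp only [expand_cell_alt, pvBd, PySem.List.foldl_append_singleton_eq_map]
  rw [PySem.List.foldl_append_eq_flatMap]
  simp

lemma pvFd_mono (n a b : Int) (hn : 0 < n) (h : a ≤ b) :
    PySem.Int.floordiv a n ≤ PySem.Int.floordiv b n := by
  rw [PySem.Int.floordiv_eq_ediv_of_pos hn, PySem.Int.floordiv_eq_ediv_of_pos hn]
  exact Int.ediv_le_ediv hn h

lemma pvBd_mono (bn : List String) (e k : Int) (hn : bn ≠ []) (he : 0 ≤ e) :
    pvBd bn e k ≤ pvBd bn e (k + 1) := by
  have hn' : (0 : Int) < bn.length := by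
    have := List.length_pos_iff.mpr hn; exact_mod_cast this
  apply pvFd_mono _ _ _ hn'
  nlinarith

lemma pvBd_zero (bn : List String) (e : Int) (hn : bn ≠ []) :
    pvBd bn e 0 = 0 := by
  have hn' : (0 : Int) < bn.length := by
    have := List.length_pos_iff.mpr hn; exact_mod_cast this
  unfold pvBd
  rw [PySem.Int.floordiv_eq_ediv_of_pos hn']
  rw [Int.ediv_eq_zero_of_lt (by omega) (by omega)]

lemma pvBd_nonneg (bn : List String) (e k : Int) (hn : bn ≠ []) (hk : 0 ≤ k) (he : 0 ≤ e) :
    0 ≤ pvBd bn e k := by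
  have hn' : (0 : Int) < bn.length := by
    have := List.length_pos_iff.mpr hn; exact_mod_cast this
  have := pvBd_zero bn e hn
  calc (0:Int) = pvBd bn e 0 := this.symm
    _ ≤ pvBd bn e k := by
        unfold pvBd; apply pvFd_mono _ _ _ hn'; nlinarith

lemma pvBd_len (bn : List String) (e : Int) (hn : bn ≠ []) :
    pvBd bn e (bn.length : Int) = e := by
  have hn' : (0 : Int) < bn.length := by
    have := List.length_pos_iff.mpr hn; exact_mod_cast this
  unfold pvBd
  rw [PySem.Int.floordiv_eq_iff_of_pos hn']
  constructor <;> nlinarith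

-- the key bracket fact: inside run k, A's name index is exactly k
lemma pv_index_eq (bn : List String) (e k pos : Int) (hn : bn ≠ []) (he : 0 < e)
    (h1 : pvBd bn e k ≤ pos) (h2 : pos < pvBd bn e (k + 1)) :
    PySem.Int.floordiv (pos * (bn.length : Int)) e = k := by
  have hn' : (0 : Int) < bn.length := by
    have := List.length_pos_iff.mpr hn; exact_mod_cast this
  unfold pvBd at h1 h2
  have t1 : PySem.Int.floordiv (k * e + (bn.length : Int) - 1) (bn.length : Int) < pos + 1 := by omega
  rw [PySem.Int.floordiv_lt_iff_lt_mul hn'] at t1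
  have t2 : pos + 1 ≤ PySem.Int.floordiv ((k + 1) * e + (bn.length : Int) - 1) (bn.length : Int) := by omega
  rw [PySem.Int.le_floordiv_iff_mul_le hn'] at t2
  rw [PySem.Int.floordiv_eq_iff_of_pos he]
  constructor <;> nlinarith

-- partition invariant: the first m runs of B cover exactly output positions [0, pvBd m)
lemma pv_main (bn : List String) (pi : List (Option Int)) (e : Int)
    (hn : bn ≠ []) (he : 0 < e) (m : Nat) (hm : (m : Int) ≤ (bn.length : Int)) :
    (PySem.List.pyRange 0 (m : Int) 1).flatMap (fun k =>
        (PySem.List.pyRange (pvBd bn e k) (pvBd bn e (k + 1)) 1).map (fun pos =>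
          ((PySem.List.pyGet? bn k).getD "",
           if pos < (pi.length : Int) then (PySem.List.pyGet? pi pos).getD none else none)))
      = (PySem.List.pyRange 0 (pvBd bn e (m : Int)) 1).map (pvF bn pi e) := by
  induction m with
  | zero =>
    simp [PySem.List.pyRange_one_eq_nil, pvBd_zero bn e hn]
  | succ m ih =>
    have hm' : (m : Int) ≤ (bn.length : Int) := by push_cast at hm ⊢; omega
    have hcast : ((m + 1 : Nat) : Int) = (m : Int) + 1 := by push_cast; ring
    rw [hcast, PySem.List.pyRange_one_succ_right (show (0:Int) ≤ (m:Int) by positivity),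
        List.flatMap_append, ih hm']
    have hsplit : PySem.List.pyRange 0 (pvBd bn e ((m : Int) + 1)) 1
        = PySem.List.pyRange 0 (pvBd bn e (m : Int)) 1
          ++ PySem.List.pyRange (pvBd bn e (m : Int)) (pvBd bn e ((m : Int) + 1)) 1 :=
      PySem.List.pyRange_one_append 0 (pvBd bn e (m : Int)) (pvBd bn e ((m : Int) + 1))
        (pvBd_nonneg bn e (m : Int) hn (by positivity) (by omega))
        (pvBd_mono bn e (m : Int) hn (by omega))
    rw [hsplit, List.map_append]
    congr 1
    simp only [List.flatMap_cons, List.flatMap_nil, List.append_nil]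
    apply List.map_congr_left
    intro pos hpos
    rw [PySem.List.mem_pyRange_one] at hpos
    unfold pvF
    rw [pv_index_eq bn e (m : Int) pos hn he hpos.1 hpos.2]

-- ===== VERDICT (by name: the statement is the Claim_ definition above) =====
theorem expand_cell_spec : Claim_equal_expand_cell := by
  intro bn pi e _ hpre
  unfold Spec_expand_cell
  rw [pvA_eq_map, pvB_eq_flatMap]
  by_cases he : e ≤ 0
  · rw [PySem.List.pyRange_one_eq_nil he, List.map_nil]
    symm
    rw [List.flatMap_eq_nil_iff]
    intro k hk
    rw [PySem.List.mem_pyRange_one] at hk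
    have hn' : (0 : Int) < (bn.length : Int) := by omega
    rw [show PySem.List.pyRange (pvBd bn e k) (pvBd bn e (k + 1)) 1 = [] from
        PySem.List.pyRange_one_eq_nil (by unfold pvBd; apply pvFd_mono _ _ _ hn'; nlinarith),
      List.map_nil]
  · have he' : 0 < e := by omega
    have hn : bn ≠ [] := by
      rcases hpre with h | h
      · exact h
      · omega
    have := pv_main bn pi e hn he' bn.length le_rfl
    rw [this, pvBd_len bn e hn]
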